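-- pv_equiv track=rewrite | github.com/BobojonovSobir0576/Generation-Image-to-Pixel-Blocks | index.py | generate_names_and_ids
-- ===== SOURCE A (Python) =====
-- import itertools
--
-- def generate_names_and_ids(n):
--     letters = ['A', 'B', 'C', 'E', 'H', 'K', 'M', 'O', 'P', 'T', 'X', 'Y']
--     numbers = [str(i) for i in range(1, 10)]
--
--     # Generate all possible combinations
--     names = []
--     ids = []
--     length = 1
--     current_id = 1
--
--     while len(names) < n:
--         length += 1
--         combinations = itertools.product(letters, repeat=length - 1)
--         for combination in combinations:
--             for number in numbers:
--                 names.append(''.join(combination) + number)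
--                 ids.append(current_id)
--                 current_id += 1
--                 if len(names) >= n:
--                     break
--             if len(names) >= n:
--                 break
--     return names, ids
-- ===== SOURCE B (Python) =====
-- def generate_names_and_ids(n):
--     letters = ['A', 'B', 'C', 'E', 'H', 'K', 'M', 'O', 'P', 'T', 'X', 'Y']
--     numbers = [str(i) for i in range(1, 10)]
--
--     names = []
--     for i in range(n):
--         # locate the letter-length group: group L holds 9 * 12**L names
--         r = i
--         L = 1
--         while r >= 9 * 12 ** L:
--             r -= 9 * 12 ** L
--             L += 1
--         digit = numbers[r % 9]
--         c = r // 9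
--         # decode c into L base-12 letters, least significant digit last
--         s = ''
--         for _ in range(L):
--             c, k = divmod(c, 12)
--             s = letters[k] + s
--         names.append(s + digit)
--     return names, list(range(1, len(names) + 1))
-- ===== Notes on version B (the rewrite author's own statement) =====
-- stated objective: alternative
-- what changed: Replaces the nested generate-and-break enumeration (while over lengths, itertools.product, inner digit loop with breaks) by a direct closed-form decoding: each name is computed from its 0-based index by subtracting group sizes 9*12**L to find the letter length, then base-12 divmod decoding of the combination index.
import Mathlib
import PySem

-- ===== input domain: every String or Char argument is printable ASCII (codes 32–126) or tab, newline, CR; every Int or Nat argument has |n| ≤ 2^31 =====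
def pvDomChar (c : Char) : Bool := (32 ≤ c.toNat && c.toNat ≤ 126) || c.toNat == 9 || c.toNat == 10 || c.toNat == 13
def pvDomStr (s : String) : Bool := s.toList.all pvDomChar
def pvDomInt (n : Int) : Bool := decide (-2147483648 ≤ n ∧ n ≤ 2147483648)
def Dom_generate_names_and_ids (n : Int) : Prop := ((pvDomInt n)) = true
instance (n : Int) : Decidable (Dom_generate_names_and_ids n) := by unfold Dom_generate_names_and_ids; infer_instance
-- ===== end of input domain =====

-- B computes each name directly from its index (group subtraction + base-12 decoding)
-- instead of A's nested generate-and-break enumeration; objective: alternative algorithm.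


-- ===== PORT A =====
def pvLetters : List String := ["A", "B", "C", "E", "H", "K", "M", "O", "P", "T", "X", "Y"]

-- numbers = [str(i) for i in range(1, 10)]
def pvNumbers : List String := (PySem.List.pyRange 1 10 1).map (fun i => PySem.Int.toStr i)

-- itertools.product(letters, repeat=k), leftmost coordinate slowest
def pvProd : Nat → List (List String)
  | 0 => [[]]
  | k + 1 => pvLetters.flatMap (fun x => (pvProd k).map (fun ys => x :: ys))

-- inner 'for number in numbers' loop with its break ('if len(names) >= n: break')
def pvInner (n : Int) : List String → String → List String → List Int → Int →
    List String × List Int × Int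
  | [], _, names, ids, cid => (names, ids, cid)
  | num :: rest, comb, names, ids, cid =>
    if n ≤ (((names ++ [comb ++ num]).length : Int)) then
      (names ++ [comb ++ num], ids ++ [cid], cid + 1)
    else pvInner n rest comb (names ++ [comb ++ num]) (ids ++ [cid]) (cid + 1)

-- 'for combination in combinations' loop with its break; ''.join(combination) → String.join (exact)
def pvCombLoop (n : Int) : List (List String) → List String → List Int → Int →
    List String × List Int × Int
  | [], names, ids, cid => (names, ids, cid)
  | comb :: rest, names, ids, cid =>
    if n ≤ (((pvInner n pvNumbers (String.join comb) names ids cid).1.length : Int)) then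
      pvInner n pvNumbers (String.join comb) names ids cid
    else
      pvCombLoop n rest (pvInner n pvNumbers (String.join comb) names ids cid).1
        (pvInner n pvNumbers (String.join comb) names ids cid).2.1
        (pvInner n pvNumbers (String.join comb) names ids cid).2.2

-- growth lemmas cited by pvWhile's decreasing_by
theorem pvInner_len (n : Int) : ∀ (nums : List String) (comb : String) (names : List String)
    (ids : List Int) (cid : Int), names.length ≤ (pvInner n nums comb names ids cid).1.length := by
  intro nums
  induction nums with
  | nil => intro comb names ids cid; simp [pvInner]
  | cons num rest ih =>
    intro comb names ids cid
    simp only [pvInner]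
    split
    · simp
    · exact le_trans (by simp) (ih comb (names ++ [comb ++ num]) (ids ++ [cid]) (cid + 1))

theorem pvInner_len_cons (n : Int) (num : String) (rest : List String) (comb : String)
    (names : List String) (ids : List Int) (cid : Int) :
    names.length + 1 ≤ (pvInner n (num :: rest) comb names ids cid).1.length := by
  simp only [pvInner]
  split
  · simp
  · exact le_trans (by simp) (pvInner_len n rest comb (names ++ [comb ++ num]) (ids ++ [cid]) (cid + 1))

theorem pvNumbers_eq : pvNumbers = ["1", "2", "3", "4", "5", "6", "7", "8", "9"] := by decide

theorem pvCombLoop_len (n : Int) : ∀ (combs : List (List String)) (names : List String)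
    (ids : List Int) (cid : Int), names.length ≤ (pvCombLoop n combs names ids cid).1.length := by
  intro combs
  induction combs with
  | nil => intro names ids cid; simp [pvCombLoop]
  | cons comb rest ih =>
    intro names ids cid
    simp only [pvCombLoop]
    split
    · exact pvInner_len n pvNumbers (String.join comb) names ids cid
    · exact le_trans (pvInner_len n pvNumbers (String.join comb) names ids cid) (ih _ _ _)

theorem pvCombLoop_len_cons (n : Int) (comb : List String) (rest : List (List String))
    (names : List String) (ids : List Int) (cid : Int) :
    names.length + 1 ≤ (pvCombLoop n (comb :: rest) names ids cid).1.length := by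
  simp only [pvCombLoop]
  have h1 : names.length + 1 ≤ (pvInner n pvNumbers (String.join comb) names ids cid).1.length := by
    rw [pvNumbers_eq]; exact pvInner_len_cons n _ _ _ _ _ _
  split
  · exact h1
  · exact le_trans h1 (pvCombLoop_len n rest _ _ _)

theorem pvProd_ne_nil : ∀ k, pvProd k ≠ []
  | 0 => by simp [pvProd]
  | k + 1 => by
    simp only [pvProd, pvLetters, List.flatMap_cons]
    intro h
    rcases List.append_eq_nil_iff.mp h with ⟨h1, _⟩
    exact pvProd_ne_nil k (List.map_eq_nil_iff.mp h1)

-- 'while len(names) < n'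
def pvWhile (n : Int) (names : List String) (ids : List Int) (length cid : Int) :
    List String × List Int :=
  if h : (names.length : Int) < n then
    pvWhile n (pvCombLoop n (pvProd ((length + 1) - 1).toNat) names ids cid).1
      (pvCombLoop n (pvProd ((length + 1) - 1).toNat) names ids cid).2.1 (length + 1)
      (pvCombLoop n (pvProd ((length + 1) - 1).toNat) names ids cid).2.2
  else (names, ids)
termination_by (n - names.length).toNat
decreasing_by
  rcases List.exists_cons_of_ne_nil (pvProd_ne_nil ((length + 1) - 1).toNat) with ⟨c, cs, hc⟩
  have := pvCombLoop_len_cons n c cs names ids cid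
  rw [← hc] at this
  omega

def generate_names_and_ids (n : Int) : List String × List Int :=
  pvWhile n [] [] 1 1

-- ===== PORT B =====
-- 'while r >= 9 * 12 ** L: r -= 9 * 12 ** L; L += 1' (values are nonnegative, so Nat is exact)
def pvFindGroup (r L : Nat) : Nat × Nat :=
  if 9 * 12 ^ L ≤ r then pvFindGroup (r - 9 * 12 ^ L) (L + 1) else (r, L)
termination_by r
decreasing_by
  have : 0 < 9 * 12 ^ L := by positivity
  omega

-- 'for _ in range(L): c, k = divmod(c, 12); s = letters[k] + s' (nonnegative, so Nat div/mod exact)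
def pvDecode : Nat → Nat → String → String
  | 0, _, s => s
  | L + 1, c, s => pvDecode L (c / 12) (pvLetters.getD (c % 12) "" ++ s)

def pvNameOf (i : Nat) : String :=
  let rL := pvFindGroup i 1
  pvDecode rL.2 (rL.1 / 9) "" ++ pvNumbers.getD (rL.1 % 9) ""

def generate_names_and_ids_alt (n : Int) : List String × List Int :=
  let names := (List.range n.toNat).map pvNameOf
  (names, PySem.List.pyRange 1 ((names.length : Int) + 1) 1)

-- ===== PRECONDITION & SPEC =====
def Spec_generate_names_and_ids (n : Int) (out : List String × List Int) : Prop := out = generate_names_and_ids_alt n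
instance (n : Int) (out : List String × List Int) : Decidable (Spec_generate_names_and_ids n out) := by unfold Spec_generate_names_and_ids; infer_instance

-- ===== CLAIM (what is proved, stated in full; the proofs are below) =====
def Claim_equal_generate_names_and_ids : Prop := ∀ (n : Int), Dom_generate_names_and_ids n → Spec_generate_names_and_ids n (generate_names_and_ids n)

-- ===== LEMMAS AND PROOFS =====

-- all names of letter-length L, in A's enumeration order
def pvGroup (L : Nat) : List String :=
  (pvProd L).flatMap (fun comb => pvNumbers.map (fun num => String.join comb ++ num))

-- concatenation of groups 1..L
def pvStream : Nat → List String
  | 0 => []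
  | L + 1 => pvStream L ++ pvGroup (L + 1)

-- T L0 k = Σ_{j<k} 9 * 12^(L0+j)  (total size of groups L0 .. L0+k-1)
def pvT : Nat → Nat → Nat
  | _, 0 => 0
  | L0, k + 1 => 9 * 12 ^ L0 + pvT (L0 + 1) k

-- the combination with index c among the 12^L words of length L, as a string (LSD-last recursion)
def pvWord : Nat → Nat → String
  | 0, _ => ""
  | L + 1, c => pvWord L (c / 12) ++ pvLetters.getD (c % 12) ""

theorem pvT_succ_top : ∀ (k L0 : Nat), pvT L0 (k + 1) = pvT L0 k + 9 * 12 ^ (L0 + k) := by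
  intro k
  induction k with
  | zero => intro L0; simp [pvT]
  | succ k ih =>
    intro L0
    show 9 * 12 ^ L0 + pvT (L0 + 1) (k + 1) = (9 * 12 ^ L0 + pvT (L0 + 1) k) + 9 * 12 ^ (L0 + (k + 1))
    rw [ih (L0 + 1)]
    have he : L0 + 1 + k = L0 + (k + 1) := by omega
    rw [he]
    omega

theorem pvProd_length : ∀ L, (pvProd L).length = 12 ^ L := by
  intro L
  induction L with
  | zero => simp [pvProd]
  | succ L ih =>
    simp [pvProd, ih, pvLetters]
    ring

theorem pvGroup_length (L : Nat) : (pvGroup L).length = 9 * 12 ^ L := by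
  simp [pvGroup, List.length_flatMap, pvNumbers_eq, pvProd_length]
  ring

theorem pvStream_length : ∀ L, (pvStream L).length = pvT 1 L := by
  intro L
  induction L with
  | zero => simp [pvStream, pvT]
  | succ L ih =>
    simp [pvStream, ih, pvGroup_length, pvT_succ_top L 1]
    have he : 1 + L = L + 1 := by omega
    rw [he]

-- generic: indexing a flatMap whose pieces all have length m
theorem flatMap_getD {α β : Type} (a₀ : α) (d : β) (f : α → List β) (m : Nat)
    (hm : 0 < m) (hf : ∀ a, (f a).length = m) :
    ∀ (xs : List α) (c : Nat), c < m * xs.length →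
      (xs.flatMap f).getD c d = (f (xs.getD (c / m) a₀)).getD (c % m) d := by
  intro xs
  induction xs with
  | nil => intro c hc; simp at hc
  | cons x xs ih =>
    intro c hc
    simp only [List.flatMap_cons]
    by_cases h : c < m
    · rw [List.getD_append _ _ _ _ (by rw [hf]; exact h), Nat.div_eq_of_lt h,
        Nat.mod_eq_of_lt h]
      rfl
    · rw [Nat.not_lt] at h
      rw [List.getD_append_right _ _ _ _ (by rw [hf]; exact h), hf]
      have hc' : c - m < m * xs.length := by
        simp only [List.length_cons] at hc
        have hml : m * (xs.length + 1) = m * xs.length + m := by ring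
        omega
      rw [ih (c - m) hc']
      have hq1 : 1 ≤ c / m := (Nat.one_le_div_iff hm).mpr h
      have hr : c % m < m := Nat.mod_lt c hm
      obtain ⟨q, hq⟩ : ∃ q, c / m = q + 1 := ⟨c / m - 1, by omega⟩
      have hmod := Nat.div_add_mod c m
      rw [hq] at hmod
      have hsub : c - m = m * q + c % m := by
        have hmq : m * (q + 1) = m * q + m := by ring
        omega
      rw [hsub, Nat.mul_add_div hm, Nat.mul_add_mod, Nat.div_eq_of_lt hr, Nat.mod_eq_of_lt hr,
        Nat.add_zero, hq, List.getD_cons_succ]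

theorem pvFindGroup_spec : ∀ (k L0 i : Nat), pvT L0 k ≤ i → i < pvT L0 (k + 1) →
    pvFindGroup i L0 = (i - pvT L0 k, L0 + k) := by
  intro k
  induction k with
  | zero =>
    intro L0 i h1 h2
    have hT : pvT L0 (0 + 1) = 9 * 12 ^ L0 + pvT (L0 + 1) 0 := rfl
    have h0 : pvT (L0 + 1) 0 = 0 := rfl
    rw [pvFindGroup, if_neg (by omega)]
    simp [pvT]
  | succ k ih =>
    intro L0 i h1 h2
    have hT1 : pvT L0 (k + 1) = 9 * 12 ^ L0 + pvT (L0 + 1) k := rfl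
    have hT2 : pvT L0 (k + 1 + 1) = 9 * 12 ^ L0 + pvT (L0 + 1) (k + 1) := rfl
    have hle : 9 * 12 ^ L0 ≤ i := by omega
    rw [pvFindGroup, if_pos hle]
    rw [ih (L0 + 1) (i - 9 * 12 ^ L0) (by omega) (by omega)]
    simp only [Prod.mk.injEq]
    exact ⟨by omega, by omega⟩

theorem pvDecode_eq : ∀ (L c : Nat) (s : String), pvDecode L c s = pvWord L c ++ s := by
  intro L
  induction L with
  | zero => intro c s; simp only [pvDecode, pvWord]; rw [String.empty_append]
  | succ L ih =>
    intro c s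
    simp only [pvDecode, pvWord]
    rw [ih, String.append_assoc]

theorem pvWord_msd : ∀ (L c : Nat), c < 12 ^ (L + 1) →
    pvWord (L + 1) c = pvLetters.getD (c / 12 ^ L) "" ++ pvWord L (c % 12 ^ L) := by
  intro L
  induction L with
  | zero =>
    intro c hc
    have hc' : c < 12 := by simpa using hc
    simp only [pvWord, pow_zero, Nat.div_one]
    rw [Nat.mod_eq_of_lt hc', String.empty_append, String.append_empty]
  | succ L ih =>
    intro c hc
    show pvWord (L + 1) (c / 12) ++ pvLetters.getD (c % 12) "" = _
    rw [ih (c / 12) (by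
      have h12 : (0:Nat) < 12 := by norm_num
      rw [Nat.div_lt_iff_lt_mul h12]
      calc c < 12 ^ (L + 1 + 1) := hc
        _ = 12 ^ (L + 1) * 12 := by ring)]
    have e1 : c / 12 / 12 ^ L = c / 12 ^ (L + 1) := by
      rw [Nat.div_div_eq_div_mul]
      congr 1
      ring
    have e2 : c / 12 % 12 ^ L = c % 12 ^ (L + 1) / 12 := by
      rw [show (12:Nat) ^ (L + 1) = 12 * 12 ^ L by ring, Nat.mod_mul_right_div_self]
    have e3 : c % 12 = c % 12 ^ (L + 1) % 12 := by
      rw [Nat.mod_mod_of_dvd c (dvd_pow_self 12 (Nat.succ_ne_zero L))]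
    rw [e1, e2, e3]
    show _ = pvLetters.getD (c / 12 ^ (L + 1)) "" ++ (pvWord L (c % 12 ^ (L + 1) / 12) ++ pvLetters.getD (c % 12 ^ (L + 1) % 12) "")
    rw [String.append_assoc]

theorem strFoldl_append (l : List String) : ∀ (x y : String),
    List.foldl (· ++ ·) (x ++ y) l = x ++ List.foldl (· ++ ·) y l := by
  induction l with
  | nil => intro x y; rfl
  | cons a t ih => intro x y; simp only [List.foldl_cons, String.append_assoc]; exact ih x (y ++ a)

theorem strJoin_cons (a : String) (l : List String) :
    String.join (a :: l) = a ++ String.join l := by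
  show List.foldl (· ++ ·) ("" ++ a) l = a ++ List.foldl (· ++ ·) "" l
  rw [String.empty_append]
  calc List.foldl (· ++ ·) a l = List.foldl (· ++ ·) (a ++ "") l := by rw [String.append_empty]
    _ = a ++ List.foldl (· ++ ·) "" l := strFoldl_append l a ""

theorem pvProd_getD : ∀ (L c : Nat), c < 12 ^ L →
    String.join ((pvProd L).getD c []) = pvWord L c := by
  intro L
  induction L with
  | zero =>
    intro c hc
    have : c = 0 := by simpa using hc
    subst this
    rfl
  | succ L ih =>
    intro c hc
    have hm : 0 < 12 ^ L := by positivity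
    have hlen : ∀ x : String, ((pvProd L).map (fun ys => x :: ys)).length = 12 ^ L := by
      intro x; simp [pvProd_length]
    have hc2 : c < 12 ^ L * pvLetters.length := by
      have : (pvLetters : List String).length = 12 := rfl
      rw [this]
      calc c < 12 ^ (L + 1) := hc
        _ = 12 ^ L * 12 := by ring
    show String.join ((pvLetters.flatMap (fun x => (pvProd L).map (fun ys => x :: ys))).getD c []) = _
    rw [flatMap_getD "" [] _ (12 ^ L) hm hlen pvLetters c hc2]
    have hcm : c % 12 ^ L < ((pvProd L).map
        (fun ys => pvLetters.getD (c / 12 ^ L) "" :: ys)).length := by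
      rw [hlen]; exact Nat.mod_lt _ hm
    rw [List.getD_eq_getElem _ _ hcm, List.getElem_map, strJoin_cons]
    have hcm' : c % 12 ^ L < (pvProd L).length := by rw [pvProd_length]; exact Nat.mod_lt _ hm
    rw [← List.getD_eq_getElem (pvProd L) [] hcm', ih (c % 12 ^ L) (Nat.mod_lt _ hm),
      pvWord_msd L c hc]

theorem pvGroup_getD (L r : Nat) (h : r < 9 * 12 ^ L) :
    (pvGroup L).getD r "" = pvWord L (r / 9) ++ pvNumbers.getD (r % 9) "" := by
  have h9 : (0 : Nat) < 9 := by norm_num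
  have hlen : ∀ comb : List String,
      (pvNumbers.map (fun num => String.join comb ++ num)).length = 9 := by
    intro comb; rw [List.length_map, pvNumbers_eq]; rfl
  have hc : r < 9 * (pvProd L).length := by rw [pvProd_length]; exact h
  unfold pvGroup
  rw [flatMap_getD [] "" _ 9 h9 hlen (pvProd L) r hc]
  have hr9 : r % 9 < (pvNumbers.map
      (fun num => String.join ((pvProd L).getD (r / 9) []) ++ num)).length := by
    rw [hlen]; exact Nat.mod_lt _ h9
  rw [List.getD_eq_getElem _ _ hr9, List.getElem_map]
  have hq : r / 9 < 12 ^ L := by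
    rw [Nat.div_lt_iff_lt_mul h9]
    calc r < 9 * 12 ^ L := h
      _ = 12 ^ L * 9 := by ring
  rw [pvProd_getD L (r / 9) hq]
  congr 1
  exact (List.getD_eq_getElem _ _ _).symm

theorem pvNameOf_correct : ∀ (L i : Nat), i < pvT 1 L → (pvStream L).getD i "" = pvNameOf i := by
  intro L
  induction L with
  | zero => intro i hi; simp [pvT] at hi
  | succ L ih =>
    intro i hi
    by_cases h : i < pvT 1 L
    · show (pvStream L ++ pvGroup (L + 1)).getD i "" = _
      rw [List.getD_append _ _ _ _ (by rw [pvStream_length]; exact h)]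
      exact ih i h
    · rw [Nat.not_lt] at h
      have hT : pvT 1 (L + 1) = pvT 1 L + 9 * 12 ^ (1 + L) := pvT_succ_top L 1
      have he : 1 + L = L + 1 := by omega
      rw [he] at hT
      show (pvStream L ++ pvGroup (L + 1)).getD i "" = _
      rw [List.getD_append_right _ _ _ _ (by rw [pvStream_length]; exact h), pvStream_length]
      have hr : i - pvT 1 L < 9 * 12 ^ (L + 1) := by omega
      rw [pvGroup_getD (L + 1) (i - pvT 1 L) hr]
      unfold pvNameOf
      rw [pvFindGroup_spec L 1 i h hi]
      simp only
      rw [pvDecode_eq, String.append_empty, he]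

theorem pvStream_take (L m : Nat) (h : m ≤ pvT 1 L) :
    (pvStream L).take m = (List.range m).map pvNameOf := by
  apply List.ext_getElem
  · simp [pvStream_length]; omega
  · intro i h1 h2
    simp only [List.getElem_take, List.getElem_map, List.getElem_range]
    have hi : i < pvT 1 L := by
      simp only [List.length_take, pvStream_length] at h1
      omega
    rw [← List.getD_eq_getElem (pvStream L) "" (by rw [pvStream_length]; exact hi)]
    exact pvNameOf_correct L i hi

theorem map_range_add (cid : Int) (a b : Nat) :
    (List.range (a + b)).map (fun (j : Nat) => cid + (j : Int)) =
      (List.range a).map (fun (j : Nat) => cid + (j : Int)) ++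
      (List.range b).map (fun (j : Nat) => (cid + (a : Int)) + (j : Int)) := by
  rw [List.range_add, List.map_append, List.map_map]
  congr 1
  apply List.map_eq_map_iff.mpr
  intro j _
  simp only [Function.comp_apply]
  push_cast
  ring

theorem pvInner_spec (n : Int) : ∀ (nums : List String) (comb : String) (names : List String)
    (ids : List Int) (cid : Int), (names.length : Int) < n →
    pvInner n nums comb names ids cid =
      (names ++ ((nums.take (min nums.length (n.toNat - names.length))).map (fun num => comb ++ num)),
       ids ++ (List.range (min nums.length (n.toNat - names.length))).map (fun (j : Nat) => cid + (j : Int)),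
       cid + ((min nums.length (n.toNat - names.length) : Nat) : Int)) := by
  intro nums
  induction nums with
  | nil => intro comb names ids cid h; simp [pvInner]
  | cons num rest ih =>
    intro comb names ids cid h
    have hlen : (names ++ [comb ++ num]).length = names.length + 1 := by simp
    simp only [pvInner, hlen]
    split
    case isTrue h2 =>
      have ht : min (num :: rest).length (n.toNat - names.length) = 1 := by
        simp only [List.length_cons]; omega
      rw [ht]
      simp [List.take_succ_cons, List.range_one]
    case isFalse h2 =>
      rw [ih comb (names ++ [comb ++ num]) (ids ++ [cid]) (cid + 1) (by rw [hlen]; omega)]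
      have hA : min rest.length (n.toNat - (names ++ [comb ++ num]).length)
          = min rest.length (n.toNat - names.length - 1) := by rw [hlen]; omega
      rw [hA]
      have htt : min (num :: rest).length (n.toNat - names.length)
          = min rest.length (n.toNat - names.length - 1) + 1 := by
        simp only [List.length_cons]; omega
      rw [htt]
      generalize min rest.length (n.toNat - names.length - 1) = t'
      simp only [Prod.mk.injEq]
      refine ⟨?_, ?_, ?_⟩
      · simp [List.take_succ_cons]
      · rw [show t' + 1 = 1 + t' from by omega, map_range_add cid 1 t']
        simp [List.range_one]
      · push_cast; ring

theorem pvCombLoop_spec (n : Int) : ∀ (combs : List (List String)) (names : List String)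
    (ids : List Int) (cid : Int), (names.length : Int) < n →
    pvCombLoop n combs names ids cid =
      (names ++ (combs.flatMap (fun comb => pvNumbers.map (fun num => String.join comb ++ num))).take
          (min (combs.flatMap (fun comb => pvNumbers.map (fun num => String.join comb ++ num))).length
            (n.toNat - names.length)),
       ids ++ (List.range (min (combs.flatMap (fun comb => pvNumbers.map (fun num => String.join comb ++ num))).length
            (n.toNat - names.length))).map (fun (j : Nat) => cid + (j : Int)),
       cid + ((min (combs.flatMap (fun comb => pvNumbers.map (fun num => String.join comb ++ num))).length
            (n.toNat - names.length) : Nat) : Int)) := by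
  intro combs
  induction combs with
  | nil => intro names ids cid h; simp [pvCombLoop]
  | cons comb rest ih =>
    intro names ids cid h
    have hnum9 : pvNumbers.length = 9 := by rw [pvNumbers_eq]; rfl
    have hmap9 : (pvNumbers.map (fun num => String.join comb ++ num)).length = 9 := by
      rw [List.length_map, hnum9]
    simp only [pvCombLoop, List.flatMap_cons]
    rw [pvInner_spec n pvNumbers (String.join comb) names ids cid h, hnum9]
    have hlen1 : (names ++ (pvNumbers.take (min 9 (n.toNat - names.length))).map
        (fun num => String.join comb ++ num)).length
        = names.length + min 9 (n.toNat - names.length) := by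
      simp only [List.length_append, List.length_map, List.length_take, hnum9]
      omega
    have hbig : ((pvNumbers.map (fun num => String.join comb ++ num)) ++
        rest.flatMap (fun comb => pvNumbers.map (fun num => String.join comb ++ num))).length
        = 9 + (rest.flatMap (fun comb => pvNumbers.map (fun num => String.join comb ++ num))).length := by
      rw [List.length_append, hmap9]
    split
    case isTrue hbr =>
      rw [hlen1] at hbr
      have ht1 : min 9 (n.toNat - names.length) = n.toNat - names.length := by omega
      have hT : min ((pvNumbers.map (fun num => String.join comb ++ num) ++
          rest.flatMap (fun comb => pvNumbers.map (fun num => String.join comb ++ num))).length)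
          (n.toNat - names.length) = min 9 (n.toNat - names.length) := by
        rw [hbig]; omega
      rw [hT]
      simp only [Prod.mk.injEq]
      refine ⟨?_, trivial⟩
      rw [List.map_take, List.take_append_of_le_length (by rw [hmap9]; omega)]
    case isFalse hbr =>
      rw [hlen1] at hbr
      have ht19 : min 9 (n.toNat - names.length) = 9 := by omega
      rw [ht19]
      rw [show pvNumbers.take 9 = pvNumbers from by rw [← hnum9, List.take_length]]
      rw [ih _ _ _ (by simp only [List.length_append, List.length_map, hnum9]; omega)]
      have hlen2 : (names ++ pvNumbers.map (fun num => String.join comb ++ num)).length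
          = names.length + 9 := by rw [List.length_append, hmap9]
      rw [hlen2]
      have htt : min ((pvNumbers.map (fun num => String.join comb ++ num) ++
          rest.flatMap (fun comb => pvNumbers.map (fun num => String.join comb ++ num))).length)
          (n.toNat - names.length)
          = 9 + min ((rest.flatMap (fun comb => pvNumbers.map (fun num => String.join comb ++ num))).length)
              (n.toNat - (names.length + 9)) := by
        rw [hbig]; omega
      rw [htt]
      generalize min ((rest.flatMap (fun comb => pvNumbers.map (fun num => String.join comb ++ num))).length)
          (n.toNat - (names.length + 9)) = t2
      simp only [Prod.mk.injEq]
      refine ⟨?_, ?_, ?_⟩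
      · rw [show (9 : Nat) + t2 = (pvNumbers.map (fun num => String.join comb ++ num)).length + t2
            from by rw [hmap9], List.take_length_add_append, List.append_assoc]
      · rw [map_range_add cid 9 t2, List.append_assoc]
      · push_cast; ring

theorem pvWhile_spec : ∀ (k L : Nat) (n : Int), n.toNat - pvT 1 L ≤ k → ((pvT 1 L : Int)) < n →
    pvWhile n (pvStream L) ((List.range (pvT 1 L)).map (fun (j : Nat) => (1 : Int) + (j : Int)))
        ((L : Int) + 1) (1 + (pvT 1 L : Int)) =
      ((List.range n.toNat).map pvNameOf,
       (List.range n.toNat).map (fun (j : Nat) => (1 : Int) + (j : Int))) := by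
  intro k
  induction k with
  | zero => intro L n h1 h2; exfalso; omega
  | succ k ih =>
    intro L n h1 h2
    have hG : 0 < 9 * 12 ^ (L + 1) := by positivity
    have hT' : pvT 1 (L + 1) = pvT 1 L + 9 * 12 ^ (L + 1) := by
      rw [pvT_succ_top L 1, show 1 + L = L + 1 from by omega]
    rw [pvWhile, dif_pos (by rw [pvStream_length]; exact h2)]
    have hL : ((((L : Int) + 1) + 1) - 1).toNat = L + 1 := by omega
    rw [hL]
    rw [pvCombLoop_spec n (pvProd (L + 1)) _ _ _ (by rw [pvStream_length]; exact h2)]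
    rw [show (pvProd (L + 1)).flatMap (fun comb => pvNumbers.map (fun num => String.join comb ++ num))
        = pvGroup (L + 1) from rfl]
    rw [pvGroup_length (L + 1), pvStream_length]
    dsimp only
    by_cases hc : n.toNat ≤ pvT 1 (L + 1)
    · have ht : min (9 * 12 ^ (L + 1)) (n.toNat - pvT 1 L) = n.toNat - pvT 1 L := by omega
      rw [ht]
      rw [pvWhile, dif_neg (by
        simp only [List.length_append, List.length_take, pvStream_length, pvGroup_length]
        omega)]
      have h1' : (pvStream L ++ pvGroup (L + 1)).take ((pvStream L).length + (n.toNat - pvT 1 L))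
          = pvStream L ++ (pvGroup (L + 1)).take (n.toNat - pvT 1 L) :=
        List.take_length_add_append _
      simp only [Prod.mk.injEq]
      constructor
      · rw [← h1', pvStream_length, show pvT 1 L + (n.toNat - pvT 1 L) = n.toNat from by omega,
          show pvStream L ++ pvGroup (L + 1) = pvStream (L + 1) from rfl,
          pvStream_take (L + 1) n.toNat hc]
      · rw [← map_range_add (1 : Int) (pvT 1 L) (n.toNat - pvT 1 L),
          show pvT 1 L + (n.toNat - pvT 1 L) = n.toNat from by omega]
    · have ht : min (9 * 12 ^ (L + 1)) (n.toNat - pvT 1 L) = 9 * 12 ^ (L + 1) := by omega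
      rw [ht]
      rw [show (pvGroup (L + 1)).take (9 * 12 ^ (L + 1)) = pvGroup (L + 1) from by
        rw [← pvGroup_length (L + 1), List.take_length]]
      rw [show pvStream L ++ pvGroup (L + 1) = pvStream (L + 1) from rfl]
      rw [← map_range_add (1 : Int) (pvT 1 L) (9 * 12 ^ (L + 1)),
        show pvT 1 L + 9 * 12 ^ (L + 1) = pvT 1 (L + 1) from by omega]
      rw [show (1 + ((pvT 1 L : Nat) : Int)) + (((9 * 12 ^ (L + 1) : Nat) : Nat) : Int)
          = 1 + ((pvT 1 (L + 1) : Nat) : Int) from by rw [hT']; push_cast; ring]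
      rw [show (((L : Int) + 1) + 1) = (((L + 1 : Nat) : Int) + 1) from by push_cast; ring]
      have hlt : pvT 1 (L + 1) < n.toNat := by omega
      have hk : n.toNat - pvT 1 (L + 1) ≤ k := by omega
      have hfin : ((pvT 1 (L + 1) : Nat) : Int) < n := by omega
      exact ih (L + 1) n hk hfin

-- ===== VERDICT (by name: the statement is the Claim_ definition above) =====
theorem generate_names_and_ids_spec : Claim_equal_generate_names_and_ids := by
  intro n _
  unfold Spec_generate_names_and_ids generate_names_and_ids generate_names_and_ids_alt
  by_cases hn : 0 < n
  · have h0 : ((pvT 1 0 : Nat) : Int) < n := by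
      have : pvT 1 0 = 0 := rfl
      rw [this]; simpa using hn
    have hmain := pvWhile_spec n.toNat 0 n (by have : pvT 1 0 = 0 := rfl; omega) h0
    simp only [pvStream, pvT, List.range_zero, List.map_nil, Nat.cast_zero, add_zero,
      zero_add] at hmain
    dsimp only
    simp only [List.length_map, List.length_range]
    rw [PySem.List.pyRange_one, show (((n.toNat : Int)) + 1 - 1).toNat = n.toNat from by omega]
    exact hmain
  · rw [pvWhile, dif_neg (by simp only [List.length_nil, Nat.cast_zero]; omega)]
    have h0 : n.toNat = 0 := by omega
    simp [h0]
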